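-- pv_equiv track=rewrite | github.com/jaesungryu96/coding-test-example | ThisIsCodingTest/CodingTest_Study/progress_que.py | solution
-- ===== SOURCE A (Python) =====
-- from collections import deque
--
-- def solution(progresses, speeds):
--     progresses_que = deque(progresses)
--     speeds_que = deque(speeds)
--
--     complete_progress = []
--
--     while progresses_que:
--         progresses_que = deque([progress + speed for progress, speed in zip(progresses_que, speeds_que)])
--
--         count = 0
--
--         if progresses_que[0] >= 100:
--             while True:
--                 if len(progresses_que) == 0:
--                     if count > 0:
--                         complete_progress.append(count)
--                     break
--
--                 x = progresses_que.popleft()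
--
--                 if x >= 100:
--                     speeds_que.popleft()
--                     count += 1
--                     continue
--                 else:
--                     progresses_que.appendleft(x)
--                     if count > 0:
--                         complete_progress.append(count)
--                     break
--
--     return complete_progress
-- ===== SOURCE B (Python) =====
-- def solution(progresses, speeds):
--     # per-task deploy day via ceil division, then one pass grouping by running max
--     days = []
--     for p, s in zip(progresses, speeds):
--         days.append(1 if p + s >= 100 else -((p - 100) // s))
--     res = []
--     cur = None
--     count = 0
--     for d in days:
--         if cur is None or d > cur:
--             if count > 0:
--                 res.append(count)
--             cur = d
--             count = 1
--         else:
--             count += 1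
--     if count > 0:
--         res.append(count)
--     return res
-- ===== Notes on version B (the rewrite author's own statement) =====
-- stated objective: faster
-- what changed: Replaces the day-by-day queue simulation (add every speed each day, pop completed heads) by a closed-form per-task deploy day via ceil division followed by a single running-max grouping pass.
-- outside the precondition, e.g. on solution([100], [0]): A returns [1], B returns [1]; on solution([200], [-50]): A returns [1], B returns [1]
import Mathlib
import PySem

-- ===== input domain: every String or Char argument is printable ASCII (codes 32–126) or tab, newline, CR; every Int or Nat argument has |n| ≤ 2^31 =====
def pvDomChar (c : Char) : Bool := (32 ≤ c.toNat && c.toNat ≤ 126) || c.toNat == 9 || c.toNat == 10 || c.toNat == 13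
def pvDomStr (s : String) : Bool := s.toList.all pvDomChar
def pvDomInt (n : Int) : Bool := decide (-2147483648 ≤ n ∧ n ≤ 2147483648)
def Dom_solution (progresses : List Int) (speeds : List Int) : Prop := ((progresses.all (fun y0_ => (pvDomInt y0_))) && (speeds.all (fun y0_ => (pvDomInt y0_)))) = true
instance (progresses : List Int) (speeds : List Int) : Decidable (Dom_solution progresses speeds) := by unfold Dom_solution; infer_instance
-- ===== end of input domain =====

-- B replaces A's day-by-day queue simulation by closed-form per-task deploy days (ceil division)
-- plus one running-max grouping pass: objective 'faster'.

-- ===== PORT A =====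
-- the inner `while True` pop loop of A: pop leading tasks ≥ 100 (popping the matching speed), count them
def popLoop : List Int → List Int → Int → List Int × List Int × Int
  | [], spd, c => ([], spd, c)
  | x :: rest, spd, c =>
      if x ≥ 100 then popLoop rest spd.tail (c + 1)
      else (x :: rest, spd, c)

-- the outer `while progresses_que` loop; `fuel` is a termination bound only (one unit per simulated
-- day; 2^33 exceeds every deploy day on the stated domain and precondition, see `dayOf_lt_fuel` below)
def aLoop : Nat → List Int → List Int → List Int → List Int
  | 0, _, _, acc => acc
  | fuel + 1, prog, spd, acc =>
      if prog.isEmpty then acc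
      else
        match List.zipWith (· + ·) prog spd with
        | [] => acc  -- Python raises IndexError here (progresses_que[0] on the empty zipped deque); excluded by Pre_
        | x :: rest' =>
            if x ≥ 100 then
              match popLoop (x :: rest') spd 0 with
              | (p2, s2, c) => aLoop fuel p2 s2 (if c > 0 then acc ++ [c] else acc)
            else aLoop fuel (x :: rest') spd acc

def solution (progresses : List Int) (speeds : List Int) : List Int :=
  aLoop 8589934592 progresses speeds []

-- ===== PORT B =====
-- per-task deploy day: 1 if done after the first day, else ceil((100 - p) / s) = -((p - 100) // s)
def dayOf (ps : Int × Int) : Int :=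
  if ps.1 + ps.2 ≥ 100 then 1 else -(PySem.Int.floordiv (ps.1 - 100) ps.2)

-- one step of B's grouping loop over the state (res, cur, count)
def groupStep (st : List Int × Option Int × Int) (d : Int) : List Int × Option Int × Int :=
  match st with
  | (res, cur, count) =>
    match cur with
    | none => (if count > 0 then res ++ [count] else res, some d, 1)
    | some m =>
        if d > m then (if count > 0 then res ++ [count] else res, some d, 1)
        else (res, some m, count + 1)

def solution_alt (progresses : List Int) (speeds : List Int) : List Int :=
  let days := (progresses.zip speeds).map dayOf
  let st := days.foldl groupStep ([], none, 0)
  if st.2.2 > 0 then st.1 ++ [st.2.2] else st.1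

-- ===== PRECONDITION & SPEC =====
-- Pre_ restricts to the problem's natural domain: every zipped speed positive (with a non-positive
-- speed the simulation in A loops forever on almost all inputs; on the few such inputs where A still
-- returns — tasks already past 100 — B happens to agree, see claim cites), and speeds nonempty when
-- progresses is (otherwise A raises IndexError indexing the empty zipped deque).
def Pre_solution (progresses : List Int) (speeds : List Int) : Prop :=
  (progresses ≠ [] → speeds ≠ []) ∧ ∀ ps ∈ progresses.zip speeds, 0 < ps.2
instance (progresses : List Int) (speeds : List Int) : Decidable (Pre_solution progresses speeds) := by unfold Pre_solution; infer_instance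

def pvWitness_solution : List Int × List Int := ([93, 30, 55], [1, 30, 5])

def Spec_solution (progresses : List Int) (speeds : List Int) (out : List Int) : Prop := out = solution_alt progresses speeds
instance (progresses : List Int) (speeds : List Int) (out : List Int) : Decidable (Spec_solution progresses speeds out) := by unfold Spec_solution; infer_instance

-- ===== CLAIM (what is proved, stated in full; the proofs are below) =====
def Claim_equal_solution : Prop := ∀ (progresses : List Int) (speeds : List Int), Dom_solution progresses speeds → Pre_solution progresses speeds → Spec_solution progresses speeds (solution progresses speeds)

-- ===== LEMMAS AND PROOFS =====

-- reference point both proofs meet at: run lengths of the running maximum of the deploy days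
def specLoop (t : Int) : List Int → List Int
  | [] => []
  | d :: rest =>
      (1 + ((rest.takeWhile (fun x => decide (x ≤ max t d))).length : Int)) ::
        specLoop (max t d) (rest.dropWhile (fun x => decide (x ≤ max t d)))
  termination_by l => l.length
  decreasing_by
    simp only [List.length_cons]
    exact Nat.lt_succ_of_le (List.length_dropWhile_le _ _)

-- value of task ps after t elapsed days
def valAt (t : Int) (ps : Int × Int) : Int := ps.1 + t * ps.2

lemma dayOf_le_iff (ps : Int × Int) (hs : 0 < ps.2) (t : Int) (ht : 1 ≤ t) :
    dayOf ps ≤ t ↔ 100 ≤ valAt t ps := by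
  obtain ⟨p, s⟩ := ps
  simp only [dayOf, valAt]
  split_ifs with h
  · constructor
    · intro _; nlinarith [mul_nonneg (by omega : (0:Int) ≤ t - 1) (le_of_lt hs)]
    · intro _; exact ht
  · rw [neg_le, PySem.Int.le_floordiv_iff_mul_le hs]
    constructor <;> intro h1 <;> nlinarith

lemma dayOf_pos (ps : Int × Int) (hs : 0 < ps.2) : 1 ≤ dayOf ps := by
  obtain ⟨p, s⟩ := ps
  simp only [dayOf]
  split_ifs with h
  · exact le_refl 1
  · have h2 : ¬ (0 ≤ PySem.Int.floordiv (p - 100) s) := by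
      intro hh
      have := (PySem.Int.le_floordiv_iff_mul_le hs).mp hh
      nlinarith
    omega

lemma dayOf_lt_fuel (ps : Int × Int) (hs : 0 < ps.2) (hp : -2147483648 ≤ ps.1) :
    dayOf ps < 8589934592 := by
  obtain ⟨p, s⟩ := ps
  simp only [dayOf]
  split_ifs with h
  · norm_num
  · have h2 : p - 100 ≤ PySem.Int.floordiv (p - 100) s := by
      rw [PySem.Int.le_floordiv_iff_mul_le hs]
      have hnp : (p - 100) * (s - 1) ≤ 0 :=
        mul_nonpos_of_nonpos_of_nonneg (by omega) (by omega)
      nlinarith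
    omega

lemma takeWhile_congr_mem {α : Type} (p q : α → Bool) :
    ∀ (l : List α), (∀ x ∈ l, p x = q x) → l.takeWhile p = l.takeWhile q
  | [], _ => rfl
  | a :: l, h => by
      simp only [List.takeWhile_cons, h a List.mem_cons_self]
      split
      · exact congrArg _ (takeWhile_congr_mem p q l fun x hx => h x (List.mem_cons_of_mem _ hx))
      · rfl

lemma dropWhile_congr_mem {α : Type} (p q : α → Bool) :
    ∀ (l : List α), (∀ x ∈ l, p x = q x) → l.dropWhile p = l.dropWhile q
  | [], _ => rfl
  | a :: l, h => by
      simp only [List.dropWhile_cons, h a List.mem_cons_self]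
      split
      · exact dropWhile_congr_mem p q l fun x hx => h x (List.mem_cons_of_mem _ hx)
      · rfl

lemma dropWhile_head_false {α : Type} (p : α → Bool) :
    ∀ (l : List α) (b : α) (bs : List α), l.dropWhile p = b :: bs → p b = false
  | [], b, bs, h => by simp at h
  | a :: l, b, bs, h => by
      by_cases hpa : p a = true
      · rw [List.dropWhile_cons_of_pos hpa] at h
        exact dropWhile_head_false p l b bs h
      · rw [List.dropWhile_cons_of_neg hpa] at h
        cases h
        simpa using hpa

-- adding one more day to the current values
lemma zip_add_day (t : Int) :
    ∀ (l : List (Int × Int)) (E : List Int),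
      List.zipWith (· + ·) (l.map (valAt t)) (l.map Prod.snd ++ E) = l.map (valAt (t + 1))
  | [], E => by simp
  | ps :: l, E => by
      simp only [List.map_cons, List.cons_append, List.zipWith_cons_cons, zip_add_day t l E]
      congr 1
      simp only [valAt]; ring

-- A's inner pop loop pops exactly the leading tasks whose value is ≥ 100
lemma popLoop_spec (f : Int × Int → Int) :
    ∀ (l : List (Int × Int)) (E : List Int) (c : Int),
      popLoop (l.map f) (l.map Prod.snd ++ E) c =
        ((l.dropWhile (fun ps => decide (100 ≤ f ps))).map f,
         (l.dropWhile (fun ps => decide (100 ≤ f ps))).map Prod.snd ++ E,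
         c + ((l.takeWhile (fun ps => decide (100 ≤ f ps))).length : Int))
  | [], E, c => by simp [popLoop]
  | ps :: l, E, c => by
      by_cases h : 100 ≤ f ps
      · have hstep : popLoop ((ps :: l).map f) ((ps :: l).map Prod.snd ++ E) c
            = popLoop (l.map f) (l.map Prod.snd ++ E) (c + 1) := by
          simp [popLoop, ge_iff_le, h]
        rw [hstep, popLoop_spec f l E (c + 1)]
        have hd : (fun q : Int × Int => decide (100 ≤ f q)) ps = true := by
          simp only [decide_eq_true_eq]
          exact h
        rw [List.dropWhile_cons_of_pos (p := fun q : Int × Int => decide (100 ≤ f q)) hd,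
          List.takeWhile_cons_of_pos (p := fun q : Int × Int => decide (100 ≤ f q)) hd]
        have hlen : c + (((ps :: l.takeWhile (fun q => decide (100 ≤ f q))).length : Nat) : Int)
            = c + 1 + (((l.takeWhile (fun q => decide (100 ≤ f q))).length : Nat) : Int) := by
          simp only [List.length_cons]
          push_cast
          ring
        rw [hlen]
      · simp [popLoop, ge_iff_le, h]

lemma aLoop_nil (fuel : Nat) (spd acc : List Int) : aLoop fuel [] spd acc = acc := by
  cases fuel <;> simp [aLoop]

lemma specLoop_congr (t u d : Int) (ds : List Int) (h : max t d = max u d) :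
    specLoop t (d :: ds) = specLoop u (d :: ds) := by
  rw [specLoop, specLoop, h]

-- main invariant for A's outer loop: t days elapsed, l the remaining (original) tasks
lemma aLoop_spec :
    ∀ (fuel : Nat) (l : List (Int × Int)) (g spd E : List Int) (t : Int) (acc : List Int),
      List.zipWith (· + ·) g spd = l.map (valAt (t + 1)) →
      spd = l.map Prod.snd ++ E →
      (∀ ps ∈ l, 0 < ps.2) →
      (∀ ps ∈ l, dayOf ps < t + (fuel : Int)) →
      (∀ ps rest, l = ps :: rest → t < dayOf ps) →
      (g = [] ↔ l = []) →
      0 ≤ t →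
      aLoop fuel g spd acc = acc ++ specLoop t (l.map dayOf) := by
  intro fuel
  induction fuel with
  | zero =>
      intro l g spd E t acc h1 h2 h3 h4 h5 h6 h7
      cases l with
      | nil =>
          rw [h6.mpr rfl]
          simp [aLoop_nil, specLoop]
      | cons a rest =>
          have hb := h4 a List.mem_cons_self
          have hc := h5 a rest rfl
          simp only [Nat.cast_zero, add_zero] at hb
          omega
  | succ fuel ih =>
      intro l g spd E t acc h1 h2 h3 h4 h5 h6 h7
      cases l with
      | nil =>
          rw [h6.mpr rfl]
          simp [aLoop_nil, specLoop]
      | cons a rest =>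
          have hg : g ≠ [] := fun hgg => List.cons_ne_nil a rest (h6.mp hgg)
          have hspos : 0 < a.2 := h3 a List.mem_cons_self
          have hday : t < dayOf a := h5 a rest rfl
          have ht1 : (1:Int) ≤ t + 1 := by omega
          have hunfold : aLoop (fuel + 1) g spd acc =
              if valAt (t + 1) a ≥ 100 then
                match popLoop (valAt (t + 1) a :: rest.map (valAt (t + 1))) spd 0 with
                | (p2, s2, c) => aLoop fuel p2 s2 (if c > 0 then acc ++ [c] else acc)
              else aLoop fuel (valAt (t + 1) a :: rest.map (valAt (t + 1))) spd acc := by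
            rw [aLoop, if_neg (by simp [hg]), h1]
            simp only [List.map_cons]
          by_cases hge : valAt (t + 1) a ≥ 100
          · -- the head completes today: dayOf a = t + 1
            have hdle : dayOf a ≤ t + 1 := (dayOf_le_iff a hspos (t + 1) ht1).mpr hge
            have hdeq : dayOf a = t + 1 := by omega
            set P : Int × Int → Bool := fun ps => decide (100 ≤ valAt (t + 1) ps) with hP
            set l' : List (Int × Int) := rest.dropWhile P with hl'
            set k : Nat := (rest.takeWhile P).length with hk
            have hPa : P a = true := by simp only [hP, decide_eq_true_eq]; exact hge
            have hpop : popLoop ((a :: rest).map (valAt (t + 1))) ((a :: rest).map Prod.snd ++ E) 0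
                = (l'.map (valAt (t + 1)), l'.map Prod.snd ++ E, ((k + 1 : Nat) : Int)) := by
              rw [popLoop_spec (valAt (t + 1)) (a :: rest) E 0,
                List.dropWhile_cons_of_pos hPa, List.takeWhile_cons_of_pos hPa]
              have hlen : (0 : Int) + (((a :: rest.takeWhile P).length : Nat) : Int)
                  = ((k + 1 : Nat) : Int) := by
                simp only [List.length_cons]
                push_cast
                omega
              rw [hlen]
            have hmap : valAt (t + 1) a :: rest.map (valAt (t + 1))
                = (a :: rest).map (valAt (t + 1)) := by simp
            rw [hunfold, if_pos hge, h2, hmap, hpop]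
            have hmatch : (match (l'.map (valAt (t + 1)), l'.map Prod.snd ++ E, ((k + 1 : Nat) : Int)) with
                | (p2, s2, c) => aLoop fuel p2 s2 (if c > 0 then acc ++ [c] else acc))
                = aLoop fuel (l'.map (valAt (t + 1))) (l'.map Prod.snd ++ E)
                  (if ((k + 1 : Nat) : Int) > 0 then acc ++ [((k + 1 : Nat) : Int)] else acc) := rfl
            have hcpos : ((k + 1 : Nat) : Int) > 0 := by push_cast; omega
            have hsub : ∀ ps ∈ l', ps ∈ a :: rest := fun ps hps =>
              List.mem_cons_of_mem _ ((List.dropWhile_sublist (l := rest) (p := P)).subset hps)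
            have hrec : aLoop fuel (l'.map (valAt (t + 1))) (l'.map Prod.snd ++ E)
                  (if ((k + 1 : Nat) : Int) > 0 then acc ++ [((k + 1 : Nat) : Int)] else acc)
                = (acc ++ [((k + 1 : Nat) : Int)]) ++ specLoop (t + 1) (l'.map dayOf) := by
              rw [if_pos hcpos]
              exact ih l' (l'.map (valAt (t + 1))) (l'.map Prod.snd ++ E) E (t + 1)
                (acc ++ [((k + 1 : Nat) : Int)])
                (zip_add_day (t + 1) l' E) rfl
                (fun ps hps => h3 ps (hsub ps hps))
                (fun ps hps => by
                  have := h4 ps (hsub ps hps)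
                  push_cast at this ⊢
                  omega)
                (fun ps rest2 heq => by
                  have hfalse : P ps = false := dropWhile_head_false P rest ps rest2 (hl' ▸ heq)
                  have hmem : ps ∈ a :: rest := hsub ps (heq ▸ List.mem_cons_self)
                  have hnot : ¬ (100 ≤ valAt (t + 1) ps) := by
                    simpa [hP] using hfalse
                  have := dayOf_le_iff ps (h3 ps hmem) (t + 1) ht1
                  omega)
                (by simp)
                (by omega)
            rw [hmatch, hrec]
            -- identify the spec side
            have hpredeq : ∀ x ∈ rest, (fun d => decide (d ≤ max t (dayOf a))) (dayOf x) = P x := by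
              intro x hx
              have hmx : max t (dayOf a) = t + 1 := by
                rw [max_eq_right (le_of_lt hday), hdeq]
              simp only [hmx, hP, decide_eq_decide]
              exact dayOf_le_iff x (h3 x (List.mem_cons_of_mem _ hx)) (t + 1) ht1
            have htw : (rest.map dayOf).takeWhile (fun d => decide (d ≤ max t (dayOf a)))
                = (rest.takeWhile P).map dayOf := by
              rw [List.takeWhile_map]
              exact congrArg _ (takeWhile_congr_mem _ _ rest hpredeq)
            have hdw : (rest.map dayOf).dropWhile (fun d => decide (d ≤ max t (dayOf a)))
                = l'.map dayOf := by
              rw [List.dropWhile_map, hl']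
              exact congrArg _ (dropWhile_congr_mem _ _ rest hpredeq)
            rw [List.map_cons, specLoop, htw, hdw,
              max_eq_right (le_of_lt hday), hdeq]
            have hcval : ((k + 1 : Nat) : Int) = 1 + (((rest.takeWhile P).map dayOf).length : Int) := by
              rw [List.length_map, ← hk]
              push_cast
              ring
            rw [← hdeq, ← hcval]
            simp [List.append_assoc]
          · -- nobody completes today
            have hnle : ¬ dayOf a ≤ t + 1 := fun hle =>
              hge ((dayOf_le_iff a hspos (t + 1) ht1).mp hle)
            rw [hunfold, if_neg hge]
            have hmap : valAt (t + 1) a :: rest.map (valAt (t + 1))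
                = (a :: rest).map (valAt (t + 1)) := by simp
            rw [hmap]
            rw [ih (a :: rest) ((a :: rest).map (valAt (t + 1))) spd E (t + 1) acc
              (by rw [h2]; exact zip_add_day (t + 1) (a :: rest) E) h2 h3
              (fun ps hps => by
                have := h4 ps hps
                push_cast at this ⊢
                omega)
              (fun ps rest2 heq => by
                cases heq
                omega)
              (by simp)
              (by omega)]
            rw [List.map_cons,
              specLoop_congr (t + 1) t (dayOf a) (rest.map dayOf)
                (by rw [max_eq_right (by omega : t + 1 ≤ dayOf a),
                  max_eq_right (le_of_lt hday)])]

-- helper: the speeds list decomposes as the zipped speeds followed by the leftover tail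
lemma snd_zip_append :
    ∀ (a b : List Int), (a.zip b).map Prod.snd ++ b.drop a.length = b
  | [], b => by simp
  | x :: a, [] => by simp
  | x :: a, y :: b => by
      simp only [List.zip_cons_cons, List.map_cons, List.cons_append, List.length_cons,
        List.drop_succ_cons]
      rw [snd_zip_append a b]

lemma zipWith_add_eq_zip_map :
    ∀ (a b : List Int), List.zipWith (· + ·) a b = (a.zip b).map (valAt 1)
  | [], b => by simp
  | x :: a, [] => by simp
  | x :: a, y :: b => by
      simp only [List.zipWith_cons_cons, List.zip_cons_cons, List.map_cons,
        zipWith_add_eq_zip_map a b]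
      congr 1
      simp [valAt]

-- A computes specLoop 0 of the deploy days
lemma solution_eq_spec (progresses speeds : List Int)
    (hdom : Dom_solution progresses speeds) (hpre : Pre_solution progresses speeds) :
    solution progresses speeds = specLoop 0 ((progresses.zip speeds).map dayOf) := by
  obtain ⟨hne, hpos⟩ := hpre
  cases progresses with
  | nil => simp [solution, aLoop_nil, specLoop]
  | cons p0 ptl =>
      have hs : speeds ≠ [] := hne (by simp)
      have hz : (p0 :: ptl).zip speeds ≠ [] := by
        cases speeds with
        | nil => exact absurd rfl hs
        | cons s0 stl => simp
      rw [solution,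
        aLoop_spec 8589934592 ((p0 :: ptl).zip speeds) (p0 :: ptl) speeds
          (speeds.drop (p0 :: ptl).length) 0 []
          (by
            rw [zipWith_add_eq_zip_map]
            norm_num)
          (snd_zip_append (p0 :: ptl) speeds).symm
          hpos
          (fun ps hps => by
            have hp1 : ps.1 ∈ p0 :: ptl := (List.of_mem_zip hps).1
            have hdom' := hdom
            simp only [Dom_solution, Bool.and_eq_true, List.all_eq_true, pvDomInt,
              decide_eq_true_eq] at hdom'
            have hlo : -2147483648 ≤ ps.1 := (hdom'.1 ps.1 hp1).1
            have := dayOf_lt_fuel ps (hpos ps hps) hlo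
            push_cast
            omega)
          (fun ps rest heq => by
            have : ps ∈ (p0 :: ptl).zip speeds := heq ▸ List.mem_cons_self
            have := dayOf_pos ps (hpos ps this)
            omega)
          (by
            constructor
            · intro h; exact absurd h (by simp)
            · intro h; exact absurd h hz)
          le_rfl]
      simp

-- B's grouping fold, from a state with an open group (cur = some m, count > 0)
lemma groupFold :
    ∀ (ds res : List Int) (m cnt : Int), 0 < cnt →
      (fun st : List Int × Option Int × Int => if st.2.2 > 0 then st.1 ++ [st.2.2] else st.1)
          (ds.foldl groupStep (res, some m, cnt)) =
        res ++ (cnt + ((ds.takeWhile (fun x => decide (x ≤ m))).length : Int)) ::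
          specLoop m (ds.dropWhile (fun x => decide (x ≤ m)))
  | [], res, m, cnt, hcnt => by
      simp [specLoop, if_pos hcnt]
  | d :: ds, res, m, cnt, hcnt => by
      by_cases hd : d > m
      · have hstep : groupStep (res, some m, cnt) d = (res ++ [cnt], some d, 1) := by
          simp [groupStep, hd, if_pos hcnt]
        rw [List.foldl_cons, hstep, groupFold ds (res ++ [cnt]) d 1 one_pos]
        have hpd : (fun x => decide (x ≤ m)) d = false := by
          simp only [decide_eq_false_iff_not]
          omega
        have htw : (d :: ds).takeWhile (fun x => decide (x ≤ m)) = [] :=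
          List.takeWhile_cons_of_neg (by simp [hpd])
        have hdw : (d :: ds).dropWhile (fun x => decide (x ≤ m)) = d :: ds :=
          List.dropWhile_cons_of_neg (by simp [hpd])
        rw [htw, hdw, specLoop, max_eq_right (le_of_lt hd)]
        simp [List.append_assoc]
      · have hstep : groupStep (res, some m, cnt) d = (res, some m, cnt + 1) := by
          simp [groupStep, hd]
        rw [List.foldl_cons, hstep, groupFold ds res m (cnt + 1) (by omega)]
        have hle : d ≤ m := by omega
        rw [List.takeWhile_cons_of_pos (by simpa using hle),
          List.dropWhile_cons_of_pos (by simpa using hle)]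
        simp only [List.length_cons]
        congr 2
        push_cast
        ring

-- B computes specLoop 0 of the deploy days
lemma solution_alt_eq_spec (progresses speeds : List Int)
    (hpre : Pre_solution progresses speeds) :
    solution_alt progresses speeds = specLoop 0 ((progresses.zip speeds).map dayOf) := by
  obtain ⟨-, hpos⟩ := hpre
  rw [solution_alt]
  cases hzm : (progresses.zip speeds).map dayOf with
  | nil => simp [specLoop]
  | cons d ds =>
      have hd1 : 1 ≤ d := by
        have : d ∈ (progresses.zip speeds).map dayOf := hzm ▸ List.mem_cons_self
        obtain ⟨ps, hps, rfl⟩ := List.mem_map.mp this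
        exact dayOf_pos ps (hpos ps hps)
      have hstep : groupStep (([] : List Int), none, (0:Int)) d = ([], some d, 1) := by
        simp [groupStep]
      simp only [List.foldl_cons, hstep]
      have := groupFold ds [] d 1 one_pos
      simp only [List.nil_append] at this
      rw [show (ds.foldl groupStep (([] : List Int), some d, (1:Int))) =
          ds.foldl groupStep ([], some d, 1) from rfl]
      rw [specLoop, max_eq_right (by omega : (0:Int) ≤ d)]
      exact this

-- ===== VERDICT (by name: the statement is the Claim_ definition above) =====
theorem solution_spec : Claim_equal_solution := by
  intro progresses speeds hdom hpre
  unfold Spec_solution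
  rw [solution_eq_spec progresses speeds hdom hpre,
    solution_alt_eq_spec progresses speeds hpre]
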